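/- GENERATED by tools/from_farm_form.py from prooffarm-gif/accepted/digest_bytes/Proof.lean (a worked proof of the farm's unit `digest_bytes`,
   accepted by the verdict) — do not edit. -/
import Gif.Spec.Units.digest_bytes
import Gif.Spec.AllSegs

open X86 X86.User Asan ProgX.Base ProgX.Base.Spec Gif.Spec

set_option maxRecDepth 4000
set_option maxHeartbeats 4000000

/-- `digest_bytes(h, p, n)` satisfies its contract: five pushes, the loop `for (i = 0; i < n; i++) h = digest_byte(h, p[i])` with the
checked byte load `p[i]` (inside the `n` live bytes of the pre: the body runs only when `i < n`, so `n ≠ 0`), the pops and the `ret`.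
THE MODEL OF A LOOP INSIDE ONE UNIT (`u_loop`; the toy with the same shape: farm/worked/weighted_sum).
LOOP INVARIANT at `loop1` (0x1053d8): `r12 = i ≤ n`, `r13 = n`, `r14 = p`, `rsp` = entry − 40, the five saved registers and the return
address in their slots, only the 64 bytes of stack below the entry's `rsp` written, the shadow untouched; `rbx` (the hash) is free.
MEASURE: `n − r12`.
    BLOCKS: 1 the prelude of a whole function whose pre is `HeapPre` only: `hp.shadowPre` is what the check takes
            2 the walk to the loop head
            3 THE INVARIANT, stated about the state the walk stopped at, under names WITHOUT `w_`; `w_kept` widened to every register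
              the body writes; the walker's facts about the head state cleared; `u_loop [i] measure`
            4 the body: the check (`LiveIn.accSmall`), the leaf call, `w_mem` restated behind it, the back edge `u_loop_back [i + 1]`
            5 the exit, walked to the `ret` -/
theorem Gif.Spec.Proved.digest_bytes_ok : Gif.Spec.digest_bytes.Statement := by
  intro Lay hLay μ hμ u₀ hcode h_byte h_load1 H rest frames u ret he hpre
  -- 1. THE PRELUDE: the pre is `HeapPre` and the live range; the check takes `ShadowPre` over `H.liveObjs ++ rest`
  v_entry he
  obtain ⟨hp, hlive⟩ := hpre
  have hsh := hp.shadowPre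
  have hsp := hsh.rsp
  -- 2. THE WALK TO THE LOOP HEAD (five pushes, `r13 = n`, `r14 = p`, `r12 = 0`)
  u_walk hcode [hμ.vendor] until [Gif.L.digest_bytes.loop1] span [ProgX.Base.L.textLo, ProgX.Base.L.textHi] side (v_side)
  -- 3. THE LOOP INVARIANT at 0x1053d8 (gif_driver.c:107), for the counter generalised as `UInt64.ofNat i`
  obtain ⟨i, hi, hile⟩ : ∃ i : Nat, s_1053b7.reg .r12 = UInt64.ofNat i ∧ i ≤ (u.reg .rdx).toNat :=
    ⟨0, w_r12, Nat.zero_le _⟩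
  have hr13 : s_1053b7.reg .r13 = u.reg .rdx := w_r13
  have hr14 : s_1053b7.reg .r14 = u.reg .rsi := w_r14
  have hsame : Mem.SameExcept [⟨(u.reg .rsp).toNat - 64, (u.reg .rsp).toNat⟩] u.mem s_1053b7.mem := by
    u_same
  have hun : ShadowUntouched u.mem s_1053b7.mem := by v_untouched
  have hs1 : UInt64.ofNat (s_1053b7.mem.readLE (u.reg .rsp - 8) 8) = u.reg .r14 := by u_resolve
  have hs2 : UInt64.ofNat (s_1053b7.mem.readLE (u.reg .rsp - 16) 8) = u.reg .r13 := by u_resolve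
  have hs3 : UInt64.ofNat (s_1053b7.mem.readLE (u.reg .rsp - 24) 8) = u.reg .r12 := by u_resolve
  have hs4 : UInt64.ofNat (s_1053b7.mem.readLE (u.reg .rsp - 32) 8) = u.reg .rbp := by u_resolve
  have hs5 : UInt64.ofNat (s_1053b7.mem.readLE (u.reg .rsp - 40) 8) = u.reg .rbx := by u_resolve
  have hs0 : UInt64.ofNat (s_1053b7.mem.readLE (u.reg .rsp) 8) = ret := by u_resolve
  have hdf : s_1053b7.flags .df = false := by
    rw [w_flags]
    exact he_df
  have hmx : s_1053b7.mxcsr &&& 8064 = 8064 := by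
    rw [w_mxcsr]
    exact he_mx
  replace w_kept := w_kept.mono_all (S' := [.r12, .r13, .r14, .rbx, .rbp, .rsp, .rdi, .rsi, .rax, .rcx, .rdx, .r8, .r9, .r10, .r11,
    .r16, .r17, .r18, .r19, .r20, .r21, .r22, .r23, .r24, .r25, .r26, .r27, .r28, .r29, .r30, .r31]) (by rfl)
  clear w_mem w_flags w_mxcsr w_r12 w_r13 w_r14 w_rbx
  u_loop [i] (fun v => (u.reg .rdx).toNat - (v.reg .r12).toNat)
  -- 4. THE BODY, from the head back to the head (`until [loop1]` again), or out
  u_walk hcode [hμ.vendor] until [Gif.L.digest_bytes.loop1] span [ProgX.Base.L.textLo, ProgX.Base.L.textHi] side (v_side)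
  case check_1053c0 =>
    -- 0x1053c0, gif_driver.c:108: the check of the load `p[i]`: `i < n`, so `n ≠ 0` and the byte is inside the `n` live bytes at `p`
    have hl : LiveIn (H.liveObjs ++ rest) frames (u.reg .rsi).toNat (u.reg .rdx).toNat := by
      rcases hlive with h0 | hl
      · exfalso
        omega
      · exact hl
    have hwhere := hl.where_ hsh.inv hsh.offText (by omega)
    have hun' : ShadowUntouched u.mem s_1053c0.mem := by v_untouched
    exact hl.accSmall hsh.inv hun' _ 1 (by decide) (by u_omega) (by u_omega)
  case call_inv =>
    v_inv
  case pre_1053cc =>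
    trivial
  · -- 0x1053d1: digest_byte has returned; it wrote nothing (its post: the memory is the one at its entry)
    v_after_call w_rsp_1053cc w_mem_1053cc
    -- `w_mem` restated from the post (never type the nest of stores by hand): the returned state then behaves like straight code
    have w_mem : s_1053ccr.mem = s_1053cc.mem := w_post
    rw [w_mem_1053cc] at w_mem
    clear w_same w_post
    u_walk hcode [hμ.vendor] until [Gif.L.digest_bytes.loop1] span [ProgX.Base.L.textLo, ProgX.Base.L.textHi] side (v_side)
    -- 0x1053d4 → 0x1053d8: the back edge
    u_loop_back [i + 1]
    · -- the counter
      rw [w_r12, UInt64.ofNat_add]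
      rfl
    · -- `jb` taken: `i < n`
      u_omega
    · -- still no store to the shadow (the return addresses of the two calls went to the stack)
      v_untouched
    · -- the direction flag: digest_byte's convention keeps it, `add` writes status flags only
      rw [w_flags]
      simp only [X86.User.df_setStatus]
      exact w_df
    · rw [w_mxcsr]
      exact w_mx
    · -- the measure: n - i
      rw [w_r12]
      u_omega
  · -- 5. 0x1053dd … 0x1053e8, gif_driver.c:111: THE EXIT, walked to the `ret`
    refine ReachVia.done (Or.inl ?_)
    v_returned
    -- the post: no store went to the shadow
    show ShadowUntouched u.mem s_1053e8.mem
    rw [w_mem]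
    exact hun
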